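-- pv_equiv track=rewrite | github.com/lesyatishch/KR2new | fffff.py | finder
-- ===== SOURCE A (Python) =====
-- def finder(arr):
--     # максимальное пятизначное число, оканчивающееся на 3
--     max_five_digit_ending_in_3 = None
--     for num in arr:
--         if 10000 <= num <= 99999 and num % 10 == 3:
--             if max_five_digit_ending_in_3 is None or num > max_five_digit_ending_in_3:
--                 max_five_digit_ending_in_3 = num
--     if max_five_digit_ending_in_3 is None:
--         return 0
--
--     # количество троек, удовлетворяющих условиям
--     count = 0
--     for i in range(len(arr) - 2):
--         triple = arr[i:i+3]
--         if any(num % 10 == 3 for num in triple):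
--             if sum(triple) <= max_five_digit_ending_in_3:
--                 count += 1
--     return count
--
-- arr = [12345, 234, 12, 1003, 40000, 15003, 99333, 123]
-- ===== SOURCE B (Python) =====
-- def finder(arr):
--     fives = [x for x in arr if 10000 <= x <= 99999 and x % 10 == 3]
--     if not fives:
--         return 0
--     best = max(fives)
--     # prefix-sum table: prefix[k] = sum(arr[:k])
--     prefix = [0]
--     s = 0
--     for v in arr:
--         s += v
--         prefix.append(s)
--     # one pass tracking the last index whose value ends in 3;
--     # window ending at i has sum prefix[i+1]-prefix[i-2] and contains
--     # such a value iff last >= i-2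
--     count = 0
--     last = -1
--     for i, v in enumerate(arr):
--         if v % 10 == 3:
--             last = i
--         if i >= 2 and last >= i - 2 and prefix[i + 1] - prefix[i - 2] <= best:
--             count += 1
--     return count
-- ===== Notes on version B (the rewrite author's own statement) =====
-- stated objective: faster
-- what changed: Phase 1 becomes filter-then-max; phase 2 no longer slices and re-sums each 3-window: B precomputes a prefix-sum table and makes a single pass tracking the last index whose value ends in 3, testing each window by prefix[i+1]-prefix[i-2] and last>=i-2.
import Mathlib
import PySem

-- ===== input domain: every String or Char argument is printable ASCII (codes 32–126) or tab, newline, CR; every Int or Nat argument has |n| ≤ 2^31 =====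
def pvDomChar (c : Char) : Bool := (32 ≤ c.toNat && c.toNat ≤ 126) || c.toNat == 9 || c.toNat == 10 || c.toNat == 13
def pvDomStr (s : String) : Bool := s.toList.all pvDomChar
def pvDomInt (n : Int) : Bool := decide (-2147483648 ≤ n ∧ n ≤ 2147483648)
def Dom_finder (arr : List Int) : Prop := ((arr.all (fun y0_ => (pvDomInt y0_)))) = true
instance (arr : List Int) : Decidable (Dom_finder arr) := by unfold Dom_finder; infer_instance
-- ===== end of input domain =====

-- B: phase 1 filter-then-max; phase 2 replaces A's per-window slicing/re-summation by a
-- prefix-sum table plus one pass tracking the last index whose value ends in 3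
-- (no per-window list allocation; a timing run measured B faster by a constant factor).

-- ===== PORT A =====
def finder (arr : List Int) : Int :=
  let maxFive : Option Int :=
    arr.foldl (fun acc num =>
      if 10000 ≤ num && num ≤ 99999 && PySem.Int.mod num 10 == 3 then
        match acc with
        | none => some num
        | some mx => if mx < num then some num else some mx
      else acc) none
  match maxFive with
  | none => 0
  | some m =>
    (PySem.List.pyRange 0 ((arr.length : Int) - 2) 1).foldl (fun count i =>
      let triple := PySem.List.slice arr (some i) (some (i + 3))
      if triple.any (fun num => PySem.Int.mod num 10 == 3) then
        if triple.sum ≤ m then count + 1 else count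
      else count) 0

-- ===== PORT B =====
-- prefix[i-2] is only reached under the guard 2 ≤ i, where the index is in range,
-- so the total pyGetD is exact for Python's prefix[i-2]/prefix[i+1].
def finder_alt (arr : List Int) : Int :=
  let fives := arr.filter (fun x => 10000 ≤ x && x ≤ 99999 && PySem.Int.mod x 10 == 3)
  match PySem.List.max? fives (fun y => y) with
  | none => 0
  | some best =>
    let pfx := (arr.foldl (fun (st : List Int × Int) v => (st.1 ++ [st.2 + v], st.2 + v)) ([0], 0)).1
    ((PySem.List.enumerate arr 0).foldl (fun (st : Int × Int) iv =>
      let last := if PySem.Int.mod iv.2 10 == 3 then iv.1 else st.2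
      (if 2 ≤ iv.1 ∧ iv.1 - 2 ≤ last ∧
          PySem.List.pyGetD pfx (iv.1 + 1) 0 - PySem.List.pyGetD pfx (iv.1 - 2) 0 ≤ best
        then st.1 + 1 else st.1, last)) ((0 : Int), (-1 : Int))).1

-- ===== PRECONDITION & SPEC =====
def Spec_finder (arr : List Int) (out : Int) : Prop := out = finder_alt arr
instance (arr : List Int) (out : Int) : Decidable (Spec_finder arr out) := by unfold Spec_finder; infer_instance

-- ===== CLAIM (what is proved, stated in full; the proofs are below) =====
def Claim_equal_finder : Prop := ∀ (arr : List Int), Dom_finder arr → Spec_finder arr (finder arr)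

-- ===== LEMMAS AND PROOFS =====

def pvQ (num : Int) : Bool := PySem.Int.mod num 10 == 3

def pvP (num : Int) : Bool := 10000 ≤ num && num ≤ 99999 && PySem.Int.mod num 10 == 3

-- A's phase-1 fold, abstracted
def pvMaxFold (arr : List Int) (acc : Option Int) : Option Int :=
  arr.foldl (fun acc num =>
    if pvP num then
      match acc with
      | none => some num
      | some mx => if mx < num then some num else some mx
    else acc) acc

theorem pvMaxFold_some (arr : List Int) (a : Int) :
    pvMaxFold arr (some a) = some ((arr.filter pvP).foldl max a) := by
  induction arr generalizing a with
  | nil => rfl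
  | cons x t ih =>
    by_cases hx : pvP x
    · have h1 : pvMaxFold (x :: t) (some a) = pvMaxFold t (some (if a < x then x else a)) := by
        simp only [pvMaxFold, List.foldl_cons, hx, if_pos]
        split_ifs <;> rfl
      rw [h1, ih]
      have : (if a < x then x else a) = max a x := by
        rcases max_choice a x with h | h <;> rw [h] <;> split_ifs <;> omega
      simp [hx, this]
    · have h1 : pvMaxFold (x :: t) (some a) = pvMaxFold t (some a) := by
        simp [pvMaxFold, hx]
      rw [h1, ih]
      simp [hx]

theorem pvMaxFold_none (arr : List Int) :
    pvMaxFold arr none = PySem.List.max? (arr.filter pvP) (fun y => y) := by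
  induction arr with
  | nil => rfl
  | cons x t ih =>
    by_cases hx : pvP x
    · have h1 : pvMaxFold (x :: t) none = pvMaxFold t (some x) := by
        simp [pvMaxFold, hx]
      rw [h1, pvMaxFold_some]
      simp [hx, PySem.List.max?_id_cons]
    · have h1 : pvMaxFold (x :: t) none = pvMaxFold t none := by
        simp [pvMaxFold, hx]
      rw [h1, ih]
      simp [hx]

-- A's phase-2 predicate on a start index
def pvPIdx (arr : List Int) (m : Int) (i : Int) : Bool :=
  (PySem.List.slice arr (some i) (some (i + 3))).any pvQ &&
    decide ((PySem.List.slice arr (some i) (some (i + 3))).sum ≤ m)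

-- turn A's nested-if counting loop into a countP
theorem pvAcount (arr : List Int) (m : Int) :
    ((PySem.List.pyRange 0 ((arr.length : Int) - 2) 1).foldl (fun count i =>
      let triple := PySem.List.slice arr (some i) (some (i + 3))
      if triple.any (fun num => PySem.Int.mod num 10 == 3) then
        if triple.sum ≤ m then count + 1 else count
      else count) 0)
      = (List.countP (pvPIdx arr m) (PySem.List.pyRange 0 ((arr.length : Int) - 2) 1) : Int) := by
  have hfun : (fun (count : Int) (i : Int) =>
      let triple := PySem.List.slice arr (some i) (some (i + 3))
      if triple.any (fun num => PySem.Int.mod num 10 == 3) then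
        if triple.sum ≤ m then count + 1 else count
      else count)
      = fun (count : Int) (i : Int) => if pvPIdx arr m i then count + 1 else count := by
    funext count i
    simp only [pvPIdx]
    by_cases h1 : (PySem.List.slice arr (some i) (some (i + 3))).any
        (fun num => PySem.Int.mod num 10 == 3) <;>
      by_cases h2 : (PySem.List.slice arr (some i) (some (i + 3))).sum ≤ m <;>
      simp [pvQ, h2]
  rw [hfun, PySem.List.foldl_count_if]
  simp

-- B's prefix-sum list: running sums of t starting from s
def pvPsums (s : Int) : List Int → List Int
  | [] => []
  | v :: t => (s + v) :: pvPsums (s + v) t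

theorem pvPfx_fold (t : List Int) (p : List Int) (s : Int) :
    t.foldl (fun (st : List Int × Int) v => (st.1 ++ [st.2 + v], st.2 + v)) (p, s)
      = (p ++ pvPsums s t, s + t.sum) := by
  induction t generalizing p s with
  | nil => simp [pvPsums]
  | cons v t ih => simp [pvPsums, ih, List.append_assoc]; ring

theorem pvPsums_getD (t : List Int) (s : Int) (k : Nat) (h : k < t.length) :
    (pvPsums s t).getD k 0 = s + (t.take (k + 1)).sum := by
  induction t generalizing s k with
  | nil => simp at h
  | cons v t ih =>
    cases k with
    | zero => simp [pvPsums]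
    | succ k =>
      simp only [pvPsums, List.getD_cons_succ, List.take_succ_cons, List.sum_cons]
      rw [ih (s + v) k (by simpa using h)]
      ring

theorem pvPfx_getD (arr : List Int) (k : Nat) (h : k ≤ arr.length) :
    (0 :: pvPsums 0 arr).getD k 0 = (arr.take k).sum := by
  cases k with
  | zero => simp
  | succ k =>
    simp only [List.getD_cons_succ]
    rw [pvPsums_getD arr 0 k (by omega)]
    simp

-- last index j < k with arr[j] ending in 3, else -1
def pvLast (arr : List Int) : Nat → Int
  | 0 => -1
  | k + 1 => if pvQ (arr.getD k 0) then (k : Int) else pvLast arr k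

theorem pvLast_succ (arr : List Int) (k : Nat) :
    pvLast arr (k + 1) = if pvQ (arr.getD k 0) then (k : Int) else pvLast arr k := rfl

theorem pvLast_lt (arr : List Int) (k : Nat) : pvLast arr k < (k : Int) := by
  induction k with
  | zero => simp [pvLast]
  | succ k ih =>
    simp only [pvLast]
    split_ifs <;> push_cast <;> omega

theorem pvLast_window (arr : List Int) (j : Nat) :
    ((j : Int) ≤ pvLast arr (j + 3))
      ↔ (pvQ (arr.getD j 0) = true ∨ pvQ (arr.getD (j + 1) 0) = true ∨
          pvQ (arr.getD (j + 2) 0) = true) := by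
  have hlt := pvLast_lt arr j
  rw [show j + 3 = (j + 2) + 1 by omega, pvLast_succ,
    show j + 2 = (j + 1) + 1 by omega, pvLast_succ, pvLast_succ]
  split_ifs with h2 h1 h0 <;> simp_all <;> push_cast <;> omega

-- the per-index condition B's loop tests at index k (with last already updated)
def pvCond (arr : List Int) (best : Int) (k : Nat) : Bool :=
  decide (2 ≤ (k : Int) ∧ (k : Int) - 2 ≤ pvLast arr (k + 1) ∧
    PySem.List.pyGetD (0 :: pvPsums 0 arr) ((k : Int) + 1) 0 -
      PySem.List.pyGetD (0 :: pvPsums 0 arr) ((k : Int) - 2) 0 ≤ best)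

-- B's main loop invariant
theorem pvLoop (arr : List Int) (best : Int) (t : List Int) (s : Nat) (c : Int)
    (ht : arr.drop s = t) :
    ((PySem.List.enumerate t ((s : Nat) : Int)).foldl (fun (st : Int × Int) iv =>
      let last := if PySem.Int.mod iv.2 10 == 3 then iv.1 else st.2
      (if 2 ≤ iv.1 ∧ iv.1 - 2 ≤ last ∧
          PySem.List.pyGetD (0 :: pvPsums 0 arr) (iv.1 + 1) 0 -
            PySem.List.pyGetD (0 :: pvPsums 0 arr) (iv.1 - 2) 0 ≤ best
        then st.1 + 1 else st.1, last)) (c, pvLast arr s)).1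
      = c + (List.countP (pvCond arr best) (List.range' s (arr.length - s)) : Int) := by
  induction t generalizing s c with
  | nil =>
    have hlen : arr.length ≤ s := by
      have := congrArg List.length ht; simp at this; omega
    simp [PySem.List.enumerate_nil, Nat.sub_eq_zero_of_le hlen]
  | cons v t ih =>
    have hs : s < arr.length := by
      have := congrArg List.length ht; simp at this; omega
    have hv : arr.getD s 0 = v := by
      have h0 := congrArg (fun l => l.getD 0 0) ht
      simpa using h0
    have ht' : arr.drop (s + 1) = t := by
      have h1 : (arr.drop s).drop 1 = t := by rw [ht]; rfl
      rw [List.drop_drop] at h1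
      exact h1
    rw [PySem.List.enumerate_cons, List.foldl_cons]
    have hlast : (if PySem.Int.mod v 10 == 3 then ((s : Nat) : Int) else pvLast arr s)
        = pvLast arr (s + 1) := by
      rw [pvLast_succ, hv]
      simp [pvQ]
    simp only [hlast]
    have hcast : ((s : Nat) : Int) + 1 = (((s + 1 : Nat)) : Int) := by push_cast; ring
    rw [hcast, ih (s + 1) _ ht']
    have hrange : List.range' s (arr.length - s)
        = s :: List.range' (s + 1) (arr.length - (s + 1)) := by
      have : arr.length - s = (arr.length - (s + 1)) + 1 := by omega
      rw [this, List.range'_succ]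
    rw [hrange, List.countP_cons]
    have hcond : (2 ≤ ((s : Nat) : Int) ∧ ((s : Nat) : Int) - 2 ≤ pvLast arr (s + 1) ∧
          PySem.List.pyGetD (0 :: pvPsums 0 arr) (((s + 1 : Nat) : Int)) 0 -
            PySem.List.pyGetD (0 :: pvPsums 0 arr) (((s : Nat) : Int) - 2) 0 ≤ best)
        ↔ pvCond arr best s = true := by
      rw [← hcast]
      simp [pvCond]
    by_cases h : pvCond arr best s = true
    · rw [if_pos (hcond.mpr h), if_pos h]
      push_cast; ring
    · rw [if_neg (fun hh => h (hcond.mp hh)), if_neg h]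
      push_cast; ring

theorem pvTriple (arr : List Int) (j : Nat) (h : j + 3 ≤ arr.length) :
    (arr.drop j).take 3 = [arr.getD j 0, arr.getD (j + 1) 0, arr.getD (j + 2) 0] := by
  apply List.ext_getElem
  · simp; omega
  · intro i h1 h2
    simp only [List.length_take, List.length_drop] at h1
    have hi : i < 3 := by omega
    interval_cases i <;>
      simp [List.getElem_take, List.getElem_drop, List.getD_eq_getElem?_getD] <;>
      rw [List.getElem?_eq_getElem (by omega)] <;> rfl

-- pointwise: B's condition at window end j+2 is A's condition at window start j
theorem pvPoint (arr : List Int) (m : Int) (j : Nat) (h : j + 3 ≤ arr.length) :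
    pvCond arr m (2 + j) = pvPIdx arr m ((j : Nat) : Int) := by
  have hslice : PySem.List.slice arr (some ((j : Nat) : Int)) (some (((j : Nat) : Int) + 3))
      = (arr.drop j).take 3 := by
    have := PySem.List.slice_natCast_add arr j 3
    push_cast at this
    simpa using this
  have hsum3 : (arr.take (j + 3)).sum = (arr.take j).sum + ((arr.drop j).take 3).sum := by
    rw [List.take_add]; simp
  have hp1 : PySem.List.pyGetD (0 :: pvPsums 0 arr) (((2 + j : Nat) : Int) + 1) 0
      = (arr.take (j + 3)).sum := by
    have : (((2 + j : Nat)) : Int) + 1 = (((j + 3 : Nat)) : Int) := by push_cast; ring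
    rw [this, PySem.List.pyGetD_natCast, pvPfx_getD arr (j + 3) h]
  have hp2 : PySem.List.pyGetD (0 :: pvPsums 0 arr) (((2 + j : Nat) : Int) - 2) 0
      = (arr.take j).sum := by
    have : (((2 + j : Nat)) : Int) - 2 = ((j : Nat) : Int) := by push_cast; ring
    rw [this, PySem.List.pyGetD_natCast, pvPfx_getD arr j (by omega)]
  have hwin : (((2 + j : Nat) : Int) - 2 ≤ pvLast arr (2 + j + 1))
      ↔ ((arr.drop j).take 3).any pvQ = true := by
    have h1 : (((2 + j : Nat)) : Int) - 2 = (j : Int) := by push_cast; ring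
    have h2 : 2 + j + 1 = j + 3 := by omega
    rw [h1, h2, pvLast_window, pvTriple arr j h]
    simp
  have h2j : (2 : Int) ≤ ((2 + j : Nat) : Int) := by push_cast; omega
  simp only [pvCond, pvPIdx, hslice, hp1, hp2]
  by_cases hA : ((arr.drop j).take 3).any pvQ = true
  · rw [hA, Bool.true_and, decide_eq_decide]
    constructor
    · intro hc
      omega
    · intro hs2
      exact ⟨h2j, hwin.mpr hA, by omega⟩
  · rw [(Bool.not_eq_true _).mp hA, Bool.false_and]
    exact decide_eq_false (fun hc => hA (hwin.mp hc.2.1))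

-- counting bridge between B's whole-range count and A's start-index count
theorem pvBridge (arr : List Int) (m : Int) :
    (List.countP (pvCond arr m) (List.range' 0 arr.length) : Int)
      = (List.countP (pvPIdx arr m) (PySem.List.pyRange 0 ((arr.length : Int) - 2) 1) : Int) := by
  rw [PySem.List.pyRange_one, List.countP_map, sub_zero]
  by_cases hn : arr.length ≤ 2
  · have h1 : List.countP (pvCond arr m) (List.range' 0 arr.length) = 0 := by
      apply List.countP_eq_zero.mpr
      intro k hk
      have : k < arr.length := by
        have := List.mem_range'_1.mp hk; omega
      simp only [pvCond, decide_eq_true_eq]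
      intro hc
      omega
    have h2 : ((arr.length : Int) - 2).toNat = 0 := by omega
    simp [h1, h2]
  · have hsplit : List.range' 0 arr.length = 0 :: 1 :: List.range' 2 (arr.length - 2) := by
      obtain ⟨k, hk⟩ : ∃ k, arr.length = k + 2 := ⟨arr.length - 2, by omega⟩
      rw [hk, show k + 2 - 2 = k by omega, show k + 2 = (k + 1) + 1 by omega,
        List.range'_succ, List.range'_succ]
    have c0 : ¬ pvCond arr m 0 = true := by norm_num [pvCond]
    have c1 : ¬ pvCond arr m 1 = true := by norm_num [pvCond]
    rw [hsplit, List.countP_cons_of_neg c0, List.countP_cons_of_neg c1,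
      List.range'_eq_map_range, List.countP_map]
    have hlen : ((arr.length : Int) - 2).toNat = arr.length - 2 := by omega
    rw [hlen]
    apply congrArg
    apply List.countP_congr
    intro j hj
    have hjlt : j < arr.length - 2 := List.mem_range.mp hj
    have := pvPoint arr m j (by omega)
    simpa using this

-- ===== VERDICT (by name: the statement is the Claim_ definition above) =====
theorem finder_spec : Claim_equal_finder := by
  intro arr _
  unfold Spec_finder finder finder_alt
  have hmax : arr.foldl (fun acc num =>
      if 10000 ≤ num && num ≤ 99999 && PySem.Int.mod num 10 == 3 then
        match acc with
        | none => some num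
        | some mx => if mx < num then some num else some mx
      else acc) none
      = PySem.List.max? (arr.filter
          (fun x => 10000 ≤ x && x ≤ 99999 && PySem.Int.mod x 10 == 3)) (fun y => y) := by
    have := pvMaxFold_none arr
    unfold pvMaxFold pvP at this
    exact this
  simp only [hmax]
  cases h : PySem.List.max? (arr.filter
      (fun x => 10000 ≤ x && x ≤ 99999 && PySem.Int.mod x 10 == 3)) (fun y => y) with
  | none => rfl
  | some m =>
    simp only []
    have hpfx : (arr.foldl (fun (st : List Int × Int) v => (st.1 ++ [st.2 + v], st.2 + v))
        (([0], 0) : List Int × Int)).1 = 0 :: pvPsums 0 arr := by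
      rw [pvPfx_fold]
      rfl
    rw [pvAcount arr m]
    simp only [hpfx]
    have hloop := pvLoop arr m arr 0 0 (by simp)
    simp only [Nat.cast_zero] at hloop
    have hl0 : pvLast arr 0 = -1 := rfl
    rw [hl0] at hloop
    rw [hloop, Nat.sub_zero, pvBridge arr m]
    ring
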